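-- pv_equiv track=rewrite | github.com/CorbinCald/WaveBench | wavebench/api.py | _map_effort
-- ===== SOURCE A (Python) =====
-- _EFFORT_ORDER: list[str] = ["low", "medium", "high", "xhigh", "max"]
--
-- def _map_effort(effort: str, supported: list[str]) -> str:
--     """Clamp *effort* to the closest value in *supported*.  Ties (equal
--     distance — e.g. xhigh on a 4.6 model between high and max) resolve
--     upward, per the "highest effort closest to the set choice" rule.
--     """
--     if effort in supported:
--         return effort
--     if effort not in _EFFORT_ORDER:
--         return effort
--     target = _EFFORT_ORDER.index(effort)
--     best: tuple | None = None
--     for level in supported: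
--         if level not in _EFFORT_ORDER:
--             continue
--         idx = _EFFORT_ORDER.index(level)
--         key = (abs(idx - target), -idx)  # min distance, then max ordinal
--         if best is None or key < best[0]:
--             best = (key, level)
--     return best[1] if best else effort
-- ===== SOURCE B (Python) =====
-- _EFFORT_ORDER: list[str] = ["low", "medium", "high", "xhigh", "max"]
--
--
-- def _map_effort(effort: str, supported: list[str]) -> str:
--     """Clamp *effort* to the closest supported level by searching outward
--     from the target index, trying the higher neighbour before the lower
--     one at each distance (upward tie-break)."""
--     if effort in supported:
--         return effort
--     if effort not in _EFFORT_ORDER: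
--         return effort
--     target = _EFFORT_ORDER.index(effort)
--     n = len(_EFFORT_ORDER)
--     for d in range(n):
--         up = target + d
--         if up < n and _EFFORT_ORDER[up] in supported:
--             return _EFFORT_ORDER[up]
--         down = target - d
--         if down >= 0 and _EFFORT_ORDER[down] in supported:
--             return _EFFORT_ORDER[down]
--     return effort
-- ===== Notes on version B (the rewrite author's own statement) =====
-- stated objective: alternative
-- what changed: Replaces A's scan of `supported` that maintains a (distance, -index) best-key tuple with an outward ring search from the target index over the fixed 5-level order, returning the first supported level found (up before down reproduces the upward tie-break).
import Mathlib
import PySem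

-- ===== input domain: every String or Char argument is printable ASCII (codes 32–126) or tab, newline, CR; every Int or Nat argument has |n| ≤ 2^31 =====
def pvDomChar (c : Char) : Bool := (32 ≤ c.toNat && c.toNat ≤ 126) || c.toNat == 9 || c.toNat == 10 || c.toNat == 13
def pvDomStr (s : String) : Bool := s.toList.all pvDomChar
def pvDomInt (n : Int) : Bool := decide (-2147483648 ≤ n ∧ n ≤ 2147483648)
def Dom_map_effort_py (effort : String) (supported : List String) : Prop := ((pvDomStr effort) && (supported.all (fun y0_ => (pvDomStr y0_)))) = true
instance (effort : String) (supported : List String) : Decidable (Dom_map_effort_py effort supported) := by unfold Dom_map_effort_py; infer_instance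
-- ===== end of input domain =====

-- B replaces A's best-key scan of `supported` with an outward ring search from the
-- target index over the fixed effort order (alternative algorithm, same cost class).


-- ===== PORT A =====
-- _EFFORT_ORDER (module-level constant shared by both implementations)
def pvOrder : List String := ["low", "medium", "high", "xhigh", "max"]

-- Python tuple '<' on (int, int), ported by hand: lexicographic (exact for int pairs)
def pvKeyLt (a b : Int × Int) : Bool := decide (a.1 < b.1 ∨ (a.1 = b.1 ∧ a.2 < b.2))

-- the loop body's update: 'if best is None or key < best[0]: best = (key, level)'
def pvUpd (key : Int × Int) (level : String) (best : Option ((Int × Int) × String)) :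
    Option ((Int × Int) × String) :=
  match best with
  | none => some (key, level)
  | some b => if pvKeyLt key b.1 then some (key, level) else some b

-- one iteration of A's 'for level in supported' loop ('continue' = the none branch;
-- 'level not in _EFFORT_ORDER' ↔ index? = none, and .index is the some payload)
def pvStep (target : Int) (best : Option ((Int × Int) × String)) (level : String) :
    Option ((Int × Int) × String) :=
  match PySem.List.index? pvOrder level with
  | none => best
  | some idx => pvUpd (|(idx : Int) - target|, -(idx : Int)) level best

def map_effort_py (effort : String) (supported : List String) : String :=
  if effort ∈ supported then effort
  else if effort ∉ pvOrder then effort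
  else
    -- .index cannot raise here: the previous guard returned when effort ∉ pvOrder
    let target : Int := ((PySem.List.index? pvOrder effort).getD 0 : Nat)
    match supported.foldl (pvStep target) none with
    | some b => b.2
    | none => effort

-- ===== PORT B =====
-- B's 'for d in range(n)' loop with its two early returns (some = return, none = fall through)
def pvSearch (supported : List String) (target : Int) : List Int → Option String
  | [] => none
  | d :: ds =>
    let up := target + d
    if up < (pvOrder.length : Int) ∧ ((PySem.List.pyGet? pvOrder up).getD "") ∈ supported then
      some ((PySem.List.pyGet? pvOrder up).getD "")
    else
      let down := target - d
      if 0 ≤ down ∧ ((PySem.List.pyGet? pvOrder down).getD "") ∈ supported then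
        some ((PySem.List.pyGet? pvOrder down).getD "")
      else pvSearch supported target ds

def map_effort_py_alt (effort : String) (supported : List String) : String :=
  if effort ∈ supported then effort
  else if effort ∉ pvOrder then effort
  else
    let target : Int := ((PySem.List.index? pvOrder effort).getD 0 : Nat)
    match pvSearch supported target (PySem.List.pyRange 0 (pvOrder.length : Int) 1) with
    | some r => r
    | none => effort

-- ===== PRECONDITION & SPEC =====
def Spec_map_effort_py (effort : String) (supported : List String) (out : String) : Prop := out = map_effort_py_alt effort supported
instance (effort : String) (supported : List String) (out : String) : Decidable (Spec_map_effort_py effort supported out) := by unfold Spec_map_effort_py; infer_instance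

-- ===== CLAIM (what is proved, stated in full; the proofs are below) =====
def Claim_equal_map_effort_py : Prop := ∀ (effort : String) (supported : List String), Dom_map_effort_py effort supported → Spec_map_effort_py effort supported (map_effort_py effort supported)

-- ===== LEMMAS AND PROOFS =====

lemma pvUpd_comm (k k' : Int × Int) (v v' : String) (b : Option ((Int × Int) × String))
    (h : k ≠ k') : pvUpd k' v' (pvUpd k v b) = pvUpd k v (pvUpd k' v' b) := by
  obtain ⟨k1, k2⟩ := k
  obtain ⟨k1', k2'⟩ := k'
  simp only [ne_eq, Prod.mk.injEq, not_and] at h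
  cases b with
  | none =>
    simp only [pvUpd]
    split_ifs with h1 h2 <;>
      first
        | rfl
        | (exfalso; simp_all only [pvKeyLt, decide_eq_true_eq, Bool.not_eq_true,
             decide_eq_false_iff_not, not_or, not_and, not_lt]; omega)
  | some p =>
    obtain ⟨⟨p1, p2⟩, pv⟩ := p
    cases h1 : pvKeyLt (k1, k2) (p1, p2) <;> cases h2 : pvKeyLt (k1', k2') (p1, p2) <;>
      simp only [pvUpd, h1, h2, Bool.false_eq_true, if_false, if_true] <;>
      split_ifs <;>
      first
        | rfl
        | (exfalso; simp_all only [pvKeyLt, decide_eq_true_eq, Bool.not_eq_true,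
             decide_eq_false_iff_not, not_or, not_and, not_lt]; omega)

lemma pvUpd_idem (k : Int × Int) (v : String) (b : Option ((Int × Int) × String)) :
    pvUpd k v (pvUpd k v b) = pvUpd k v b := by
  obtain ⟨k1, k2⟩ := k
  cases b with
  | none =>
    simp only [pvUpd]
    split_ifs <;>
      first | rfl | (exfalso; simp_all only [pvKeyLt, decide_eq_true_eq, Bool.not_eq_true,
        decide_eq_false_iff_not, not_or, not_and, not_lt]; omega)
  | some p =>
    obtain ⟨⟨p1, p2⟩, pv⟩ := p
    cases h1 : pvKeyLt (k1, k2) (p1, p2) <;>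
      simp only [pvUpd, h1, Bool.false_eq_true, if_false, if_true] <;>
      split_ifs <;>
      first
        | rfl
        | (exfalso; simp_all only [pvKeyLt, decide_eq_true_eq, Bool.not_eq_true,
             decide_eq_false_iff_not, not_or, not_and, not_lt]; omega)

lemma pvStep_comm (t : Int) (b : Option ((Int × Int) × String)) (a a' : String) :
    pvStep t (pvStep t b a) a' = pvStep t (pvStep t b a') a := by
  unfold pvStep
  cases h : PySem.List.index? pvOrder a with
  | none => cases h' : PySem.List.index? pvOrder a' <;> rfl
  | some i =>
    cases h' : PySem.List.index? pvOrder a' with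
    | none => rfl
    | some i' =>
      rcases eq_or_ne i i' with rfl | hne
      · obtain ⟨hk, ha, _⟩ := PySem.List.getElem_of_index?_eq_some h
        obtain ⟨hk', ha', _⟩ := PySem.List.getElem_of_index?_eq_some h'
        rw [ha.symm.trans ha']
      · exact pvUpd_comm _ _ _ _ _ (by
          intro he
          have : -(i : Int) = -(i' : Int) := congrArg Prod.snd he
          omega)

lemma pvStep_idem (t : Int) (b : Option ((Int × Int) × String)) (a : String) :
    pvStep t (pvStep t b a) a = pvStep t b a := by
  unfold pvStep
  cases h : PySem.List.index? pvOrder a with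
  | none => rfl
  | some i => exact pvUpd_idem _ _ _

lemma pvStep_not_mem (t : Int) (b : Option ((Int × Int) × String)) (a : String)
    (h : a ∉ pvOrder) : pvStep t b a = b := by
  unfold pvStep
  rw [(PySem.List.index?_eq_none_iff _ _).mpr h]

-- conditional step, and A's whole loop expressed as five conditional steps
def pvCB (t : Int) (a : String) (m : Bool) (b : Option ((Int × Int) × String)) :
    Option ((Int × Int) × String) :=
  cond m (pvStep t b a) b

def pvApplyB (t : Int) (m0 m1 m2 m3 m4 : Bool) (b : Option ((Int × Int) × String)) :
    Option ((Int × Int) × String) :=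
  pvCB t "max" m4 (pvCB t "xhigh" m3 (pvCB t "high" m2 (pvCB t "medium" m1 (pvCB t "low" m0 b))))

lemma pvCB_step_swap (t : Int) (a : String) (m : Bool) (b : Option ((Int × Int) × String))
    (x : String) : pvCB t a m (pvStep t b x) = pvStep t (pvCB t a m b) x := by
  cases m
  · rfl
  · exact pvStep_comm t b x a

lemma pvCB_absorb (t : Int) (a : String) (m : Bool) (b : Option ((Int × Int) × String)) :
    pvCB t a m (pvStep t b a) = pvStep t b a := by
  cases m
  · rfl
  · exact pvStep_idem t b a

lemma pv_decide_mem_cons_self (x : String) (s : List String) :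
    decide (x ∈ x :: s) = true := by simp

lemma pv_decide_mem_cons_ne (x a : String) (s : List String) (h : x ≠ a) :
    decide (x ∈ a :: s) = decide (x ∈ s) := by
  rw [decide_eq_decide]; simp [List.mem_cons, h]

lemma pv_fold_char (t : Int) (s : List String) (b : Option ((Int × Int) × String)) :
    s.foldl (pvStep t) b =
      pvApplyB t (decide ("low" ∈ s)) (decide ("medium" ∈ s)) (decide ("high" ∈ s))
        (decide ("xhigh" ∈ s)) (decide ("max" ∈ s)) b := by
  induction s generalizing b with
  | nil => simp [pvApplyB, pvCB]
  | cons a s ih =>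
    rw [List.foldl_cons, ih]
    by_cases h0 : a = "low"
    · subst h0
      rw [pv_decide_mem_cons_self,
        pv_decide_mem_cons_ne "medium" _ _ (by decide),
        pv_decide_mem_cons_ne "high" _ _ (by decide),
        pv_decide_mem_cons_ne "xhigh" _ _ (by decide),
        pv_decide_mem_cons_ne "max" _ _ (by decide)]
      simp only [pvApplyB]
      rw [pvCB_absorb]
      rfl
    by_cases h1 : a = "medium"
    · subst h1
      rw [pv_decide_mem_cons_self,
        pv_decide_mem_cons_ne "low" _ _ (by decide),
        pv_decide_mem_cons_ne "high" _ _ (by decide),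
        pv_decide_mem_cons_ne "xhigh" _ _ (by decide),
        pv_decide_mem_cons_ne "max" _ _ (by decide)]
      simp only [pvApplyB]
      rw [pvCB_step_swap, pvCB_absorb]
      rfl
    by_cases h2 : a = "high"
    · subst h2
      rw [pv_decide_mem_cons_self,
        pv_decide_mem_cons_ne "low" _ _ (by decide),
        pv_decide_mem_cons_ne "medium" _ _ (by decide),
        pv_decide_mem_cons_ne "xhigh" _ _ (by decide),
        pv_decide_mem_cons_ne "max" _ _ (by decide)]
      simp only [pvApplyB]
      rw [pvCB_step_swap, pvCB_step_swap, pvCB_absorb]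
      rfl
    by_cases h3 : a = "xhigh"
    · subst h3
      rw [pv_decide_mem_cons_self,
        pv_decide_mem_cons_ne "low" _ _ (by decide),
        pv_decide_mem_cons_ne "medium" _ _ (by decide),
        pv_decide_mem_cons_ne "high" _ _ (by decide),
        pv_decide_mem_cons_ne "max" _ _ (by decide)]
      simp only [pvApplyB]
      rw [pvCB_step_swap, pvCB_step_swap, pvCB_step_swap, pvCB_absorb]
      rfl
    by_cases h4 : a = "max"
    · subst h4
      rw [pv_decide_mem_cons_self,
        pv_decide_mem_cons_ne "low" _ _ (by decide),
        pv_decide_mem_cons_ne "medium" _ _ (by decide),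
        pv_decide_mem_cons_ne "high" _ _ (by decide),
        pv_decide_mem_cons_ne "xhigh" _ _ (by decide)]
      simp only [pvApplyB]
      rw [pvCB_step_swap, pvCB_step_swap, pvCB_step_swap, pvCB_step_swap, pvCB_absorb]
      rfl
    · have hnm : a ∉ pvOrder := by
        simp [pvOrder, h0, h1, h2, h3, h4]
      have hne : ∀ x : String, x ∈ pvOrder → x ≠ a := fun x hx he => hnm (he ▸ hx)
      rw [pvStep_not_mem t b a hnm,
        pv_decide_mem_cons_ne "low" _ _ (hne _ (by decide)),
        pv_decide_mem_cons_ne "medium" _ _ (hne _ (by decide)),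
        pv_decide_mem_cons_ne "high" _ _ (hne _ (by decide)),
        pv_decide_mem_cons_ne "xhigh" _ _ (hne _ (by decide)),
        pv_decide_mem_cons_ne "max" _ _ (hne _ (by decide))]

-- ===== VERDICT (by name: the statement is the Claim_ definition above) =====
set_option maxHeartbeats 2000000 in
theorem map_effort_py_spec : Claim_equal_map_effort_py := by
  intro effort supported _
  unfold Spec_map_effort_py map_effort_py map_effort_py_alt
  by_cases hs : effort ∈ supported
  · simp [hs]
  by_cases ho : effort ∈ pvOrder
  · rw [if_neg hs, if_neg (not_not_intro ho), if_neg hs, if_neg (not_not_intro ho)]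
    have hr : PySem.List.pyRange 0 (5 : Int) 1 = [0, 1, 2, 3, 4] := by decide
    have i0 : List.idxOf? ("low" : String) ["low", "medium", "high", "xhigh", "max"] = some 0 := by decide
    have i1 : List.idxOf? ("medium" : String) ["low", "medium", "high", "xhigh", "max"] = some 1 := by decide
    have i2 : List.idxOf? ("high" : String) ["low", "medium", "high", "xhigh", "max"] = some 2 := by decide
    have i3 : List.idxOf? ("xhigh" : String) ["low", "medium", "high", "xhigh", "max"] = some 3 := by decide
    have i4 : List.idxOf? ("max" : String) ["low", "medium", "high", "xhigh", "max"] = some 4 := by decide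
    have hord : effort = "low" ∨ effort = "medium" ∨ effort = "high" ∨ effort = "xhigh" ∨
        effort = "max" := by simpa [pvOrder] using ho
    rcases hord with rfl | rfl | rfl | rfl | rfl
    · by_cases m0 : "medium" ∈ supported <;>
        by_cases m1 : "high" ∈ supported <;>
        by_cases m2 : "xhigh" ∈ supported <;>
        by_cases m3 : "max" ∈ supported <;>
        simp [pv_fold_char, hr, pvSearch, pvApplyB, pvCB, pvStep, pvUpd, pvKeyLt, pvOrder,
          PySem.List.index?, PySem.List.pyGet?, PySem.List.pyIdx?, i0, i1, i2, i3, i4,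
          hs, m0, m1, m2, m3]
    · by_cases m0 : "low" ∈ supported <;>
        by_cases m1 : "high" ∈ supported <;>
        by_cases m2 : "xhigh" ∈ supported <;>
        by_cases m3 : "max" ∈ supported <;>
        simp [pv_fold_char, hr, pvSearch, pvApplyB, pvCB, pvStep, pvUpd, pvKeyLt, pvOrder,
          PySem.List.index?, PySem.List.pyGet?, PySem.List.pyIdx?, i0, i1, i2, i3, i4,
          hs, m0, m1, m2, m3]
    · by_cases m0 : "low" ∈ supported <;>
        by_cases m1 : "medium" ∈ supported <;>
        by_cases m2 : "xhigh" ∈ supported <;>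
        by_cases m3 : "max" ∈ supported <;>
        simp [pv_fold_char, hr, pvSearch, pvApplyB, pvCB, pvStep, pvUpd, pvKeyLt, pvOrder,
          PySem.List.index?, PySem.List.pyGet?, PySem.List.pyIdx?, i0, i1, i2, i3, i4,
          hs, m0, m1, m2, m3]
    · by_cases m0 : "low" ∈ supported <;>
        by_cases m1 : "medium" ∈ supported <;>
        by_cases m2 : "high" ∈ supported <;>
        by_cases m3 : "max" ∈ supported <;>
        simp [pv_fold_char, hr, pvSearch, pvApplyB, pvCB, pvStep, pvUpd, pvKeyLt, pvOrder,
          PySem.List.index?, PySem.List.pyGet?, PySem.List.pyIdx?, i0, i1, i2, i3, i4,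
          hs, m0, m1, m2, m3]
    · by_cases m0 : "low" ∈ supported <;>
        by_cases m1 : "medium" ∈ supported <;>
        by_cases m2 : "high" ∈ supported <;>
        by_cases m3 : "xhigh" ∈ supported <;>
        simp [pv_fold_char, hr, pvSearch, pvApplyB, pvCB, pvStep, pvUpd, pvKeyLt, pvOrder,
          PySem.List.index?, PySem.List.pyGet?, PySem.List.pyIdx?, i0, i1, i2, i3, i4,
          hs, m0, m1, m2, m3]
  · simp [hs, ho]
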